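-- pv_equiv track=rewrite | github.com/javadebadi/django-blog | blog/logic.py | remove_tags
-- ===== SOURCE A (Python) =====
-- def remove_tags(string):
--     for i in range(6, 0, -1):
--         if string.startswith('#'*i):
--             return string[i:]
--     if string.startswith('>>>'):
--         return string[3:]
--     else:
--         return string
-- ===== SOURCE B (Python) =====
-- def remove_tags(string):
--     def count_hashes(s, n):
--         if n == 6 or not s.startswith('#'):
--             return n
--         return count_hashes(s[1:], n + 1)
--     n = count_hashes(string, 0)
--     if n:
--         return string[n:]
--     if string.startswith('>>>'):
--         return string[3:]
--     return string
-- ===== Notes on version B (the rewrite author's own statement) =====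
-- stated objective: simpler
-- what changed: B counts the leading hash characters in one forward scan capped at 6 and strips that many, instead of A's six backward startswith tests against repeated-hash prefixes.
import Mathlib
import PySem

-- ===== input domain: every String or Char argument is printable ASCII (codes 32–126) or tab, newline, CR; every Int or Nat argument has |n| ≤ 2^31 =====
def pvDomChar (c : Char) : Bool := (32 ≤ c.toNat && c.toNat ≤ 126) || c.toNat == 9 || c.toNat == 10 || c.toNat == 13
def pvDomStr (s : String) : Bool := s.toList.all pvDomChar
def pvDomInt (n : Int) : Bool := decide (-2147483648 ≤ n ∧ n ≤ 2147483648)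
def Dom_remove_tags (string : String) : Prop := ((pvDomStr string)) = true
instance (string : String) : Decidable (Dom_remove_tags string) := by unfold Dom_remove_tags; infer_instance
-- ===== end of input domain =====

-- B strips the leading hashes (capped at 6) found by one forward counting scan instead of A's six startswith tests; simpler decomposition, same behaviour.


-- ===== PORT A =====
-- the loop 'for i in range(6, 0, -1)' over the remaining indices; '#'*i is String.ofList (List.replicate i.toNat '#'), exact for the nonnegative i of this range
def removeTagsGo (string : String) : List Int → String
  | [] =>
      if PySem.Str.startswith string ">>>" then PySem.Str.slice string (some 3) none
      else string
  | i :: rest =>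
      if PySem.Str.startswith string (String.ofList (List.replicate i.toNat '#')) then
        PySem.Str.slice string (some i) none
      else removeTagsGo string rest

def remove_tags (string : String) : String :=
  removeTagsGo string (PySem.List.pyRange 6 0 (-1))

-- ===== PORT B =====
-- count_hashes(s, n) from Source B, on the character list: the guard 'n == 6 or not s.startswith('#')'
-- becomes the n = 6 test plus a head match; s[1:] is the tail
def countHashes (n : Nat) (s : List Char) : Nat :=
  if n = 6 then n
  else match s with
    | c :: t => if c = '#' then countHashes (n + 1) t else n
    | [] => n

def remove_tags_alt (string : String) : String :=
  let n := countHashes 0 string.toList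
  if n ≠ 0 then PySem.Str.slice string (some (n : Int)) none
  else if PySem.Str.startswith string ">>>" then PySem.Str.slice string (some 3) none
  else string

-- ===== PRECONDITION & SPEC =====
def Spec_remove_tags (string : String) (out : String) : Prop := out = remove_tags_alt string
instance (string : String) (out : String) : Decidable (Spec_remove_tags string out) := by unfold Spec_remove_tags; infer_instance

-- ===== CLAIM (what is proved, stated in full; the proofs are below) =====
def Claim_equal_remove_tags : Prop := ∀ (string : String), Dom_remove_tags string → Spec_remove_tags string (remove_tags string)

-- ===== LEMMAS AND PROOFS =====

-- replicate i '#' is a prefix iff at least i leading '#'s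
theorem replicate_hash_prefix_iff (i : Nat) (l : List Char) :
    List.replicate i '#' <+: l ↔ i ≤ (l.takeWhile (· == '#')).length := by
  induction i generalizing l with
  | zero => simp
  | succ i ih =>
    cases l with
    | nil => simp [List.replicate_succ]
    | cons c t =>
      by_cases hc : c = '#'
      · subst hc
        simp [List.replicate_succ, ih]
      · simp only [List.replicate_succ, List.cons_prefix_cons, List.takeWhile_cons]
        simp [hc]
        intro h
        exact absurd h.symm hc

theorem countHashes_eq (s : List Char) (n : Nat) (hn : n ≤ 6) :
    countHashes n s = min 6 (n + (s.takeWhile (· == '#')).length) := by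
  induction s generalizing n with
  | nil => rw [countHashes]; split <;> simp <;> omega
  | cons c t ih =>
    by_cases h6 : n = 6
    · subst h6
      rw [countHashes]
      simp only [reduceIte]
      omega
    · rw [countHashes]
      simp only [h6, if_false]
      by_cases hc : c = '#'
      · subst hc
        rw [ih (n + 1) (by omega)]
        simp
        omega
      · have hb : (c == '#') = false := by simp [hc]
        simp [hc, hb]
        omega

theorem startswith_hash_eq (s : String) (i : Nat) :
    PySem.Str.startswith s (String.ofList (List.replicate i '#'))
      = decide (i ≤ (s.toList.takeWhile (· == '#')).length) := by
  by_cases h : i ≤ (s.toList.takeWhile (· == '#')).length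
  · simp [h, PySem.Chars.startswith_iff, replicate_hash_prefix_iff, String.toList_ofList]
  · simp only [PySem.Str.startswith_eq, String.toList_ofList]
    rw [decide_eq_false h, ← Bool.not_eq_true, PySem.Chars.startswith_iff,
        replicate_hash_prefix_iff]
    exact h

set_option maxHeartbeats 1000000 in
theorem remove_tags_spec : Claim_equal_remove_tags := by
  intro s _
  unfold Spec_remove_tags remove_tags remove_tags_alt
  have hr : PySem.List.pyRange 6 0 (-1) = [6, 5, 4, 3, 2, 1] := by decide
  rw [hr]
  have hcount := countHashes_eq s.toList 0 (by omega)
  simp only [Nat.zero_add] at hcount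
  simp only [removeTagsGo, hcount]
  rw [show ((6:Int).toNat) = 6 from rfl, show ((5:Int).toNat) = 5 from rfl,
     show ((4:Int).toNat) = 4 from rfl, show ((3:Int).toNat) = 3 from rfl,
     show ((2:Int).toNat) = 2 from rfl, show ((1:Int).toNat) = 1 from rfl]
  rw [startswith_hash_eq s 6, startswith_hash_eq s 5, startswith_hash_eq s 4,
     startswith_hash_eq s 3, startswith_hash_eq s 2, startswith_hash_eq s 1]
  set L := (s.toList.takeWhile (· == '#')).length with hL
  simp only [decide_eq_true_eq]
  split_ifs
  all_goals first
    | rfl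
    | (exfalso; omega)
    | (congr 1 <;> simp <;> omega)
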